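-- pv_equiv track=rewrite | github.com/StefanTodoran/web-minify | css_html_js_minify/js_minifier.py | concatenate_shorthand_if_statements
-- ===== SOURCE A (Python) =====
-- def concatenate_shorthand_if_statements(js):
--     lines = js.splitlines()
--     output = []
--     inside_if = False
--
--     for line in lines:
--         line = line.strip()
--
--         if line.startswith('if') and not line.endswith('{'):
--             inside_if = True
--             output.append(line)
--         elif inside_if:
--             output[-1] += ' ' + line
--             if line.endswith(';'):
--                 inside_if = False
--         else:
--             output.append(line)
--
--     result = ""
--     for line in output:
--         result += "\n" + line
--
--     return result
-- ===== SOURCE B (Python) =====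
-- def concatenate_shorthand_if_statements(js):
--     lines = [l.strip() for l in js.splitlines()]
--     # stage 1: classify each line
--     starts = [l.startswith('if') and not l.endswith('{') for l in lines]
--     ends = [l.endswith(';') for l in lines]
--     # stage 2: scan of the "inside a shorthand if" state before each line
--     inside = [False]
--     for s, e in zip(starts, ends):
--         inside.append(s or (inside[-1] and not e))
--     # stage 3: each line is preceded by ' ' (merged) or '\n' (own entry)
--     seps = [' ' if (ins and not s) else '\n' for ins, s in zip(inside, starts)]
--     return ''.join(s + l for s, l in zip(seps, lines))
-- ===== Notes on version B (the rewrite author's own statement) =====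
-- stated objective: alternative
-- what changed: Replaces A's single-pass state machine that mutates a list of output entries (appending or extending output[-1]) by staged passes: classify every line (if-starter / ';'-terminated), compute the inside-if state as a scan with the recurrence inside' = starts or (inside and not ends), map each line to its separator (' ' merged, '\n' own entry), and join once.
import Mathlib
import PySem

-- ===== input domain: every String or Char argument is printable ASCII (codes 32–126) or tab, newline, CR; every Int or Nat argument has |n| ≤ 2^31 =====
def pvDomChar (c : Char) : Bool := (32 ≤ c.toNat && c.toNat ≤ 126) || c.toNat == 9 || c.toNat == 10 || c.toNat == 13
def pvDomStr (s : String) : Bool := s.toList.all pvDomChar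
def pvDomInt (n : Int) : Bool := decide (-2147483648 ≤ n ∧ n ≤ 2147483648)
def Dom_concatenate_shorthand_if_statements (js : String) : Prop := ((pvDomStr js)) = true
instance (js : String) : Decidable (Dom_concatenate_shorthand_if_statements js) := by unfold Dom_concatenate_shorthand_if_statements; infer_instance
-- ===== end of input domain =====

-- B replaces A's entry-list state machine (append / extend output[-1]) by staged passes:
-- classify every line, scan the inside-if state, map each line to its separator
-- (' ' merged, '\n' own entry) and join once — an alternative decomposition, same O(n) cost.

-- ===== PORT A =====
-- a (stripped) line that opens a shorthand if: `line.startswith('if') and not line.endswith('{')`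
def pvStartsIf (l : String) : Bool :=
  PySem.Str.startswith l "if" && !(PySem.Str.endswith l "{")

-- `output[-1] += ' ' + line` : append to the last element of the list (in A this is only
-- reached with a non-empty list, where this is exact — inside_if is set only after an append).
def pvAppendLast (s : String) : List String → List String
  | [] => []
  | [x] => [x ++ s]
  | x :: xs => x :: pvAppendLast s xs

-- A's loop body on the stripped line, state = (output, inside_if)
def pvStepA (st : List String × Bool) (line : String) : List String × Bool :=
  if pvStartsIf line then
    (st.1 ++ [line], true)
  else if st.2 then
    (pvAppendLast (" " ++ line) st.1,
     if PySem.Str.endswith line ";" then false else st.2)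
  else
    (st.1 ++ [line], st.2)

def concatenate_shorthand_if_statements (js : String) : String :=
  let lines := PySem.Str.splitlines js
  let st := lines.foldl (fun st rawline => pvStepA st (PySem.Str.strip rawline)) ([], false)
  st.1.foldl (fun r l => r ++ ("\n" ++ l)) ""

-- ===== PORT B =====
def concatenate_shorthand_if_statements_alt (js : String) : String :=
  let lines := (PySem.Str.splitlines js).map PySem.Str.strip
  let starts := lines.map (fun l => PySem.Str.startswith l "if" && !(PySem.Str.endswith l "{"))
  let ends := lines.map (fun l => PySem.Str.endswith l ";")
  -- `inside[-1]` ported as getLastD false: the accumulator list starts at [false] and only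
  -- grows, so it is never empty and getLastD is exact here
  let inside := (starts.zip ends).foldl
    (fun a (p : Bool × Bool) => a ++ [p.1 || (a.getLastD false && !p.2)]) [false]
  let seps := (inside.zip starts).map (fun p => if p.1 && !p.2 then " " else "\n")
  PySem.Str.join "" ((seps.zip lines).map (fun p : String × String => p.1 ++ p.2))

-- ===== PRECONDITION & SPEC =====
def Spec_concatenate_shorthand_if_statements (js : String) (out : String) : Prop := out = concatenate_shorthand_if_statements_alt js
instance (js : String) (out : String) : Decidable (Spec_concatenate_shorthand_if_statements js out) := by unfold Spec_concatenate_shorthand_if_statements; infer_instance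

-- ===== CLAIM (what is proved, stated in full; the proofs are below) =====
def Claim_equal_concatenate_shorthand_if_statements : Prop := ∀ (js : String), Dom_concatenate_shorthand_if_statements js → Spec_concatenate_shorthand_if_statements js (concatenate_shorthand_if_statements js)

-- ===== LEMMAS AND PROOFS =====

-- recursive form of B's inside-state scan
def pvScan (b : Bool) : List (Bool × Bool) → List Bool
  | [] => [b]
  | p :: ps => b :: pvScan (p.1 || (b && !p.2)) ps

theorem pvBuild_eq_scan (ps : List (Bool × Bool)) : ∀ (ins : List Bool) (b : Bool),
    ps.foldl (fun a (p : Bool × Bool) => a ++ [p.1 || (a.getLastD false && !p.2)]) (ins ++ [b])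
      = ins ++ pvScan b ps := by
  induction ps with
  | nil => intro ins b; simp [pvScan]
  | cons p ps ih =>
    intro ins b
    simp only [List.foldl, List.getLastD_concat, pvScan]
    rw [show ins ++ [b] ++ [p.1 || (b && !p.2)] = (ins ++ [b]) ++ [p.1 || (b && !p.2)] from rfl,
      ih (ins ++ [b])]
    simp

-- the common recursive specification: the whole result from the current inside-state
def pvBody (b : Bool) : List String → String
  | [] => ""
  | l :: ls =>
    (if b && !(pvStartsIf l) then " " else "\n") ++ l
      ++ pvBody (pvStartsIf l || (b && !(PySem.Str.endswith l ";"))) ls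

def pvRender (out : List String) : String :=
  out.foldl (fun r l => r ++ ("\n" ++ l)) ""

theorem pvRender_snoc (out : List String) (l : String) :
    pvRender (out ++ [l]) = pvRender out ++ ("\n" ++ l) := by
  simp [pvRender]

theorem pvAppendLast_snoc (s : String) (out : List String) (cur : String) :
    pvAppendLast s (out ++ [cur]) = out ++ [cur ++ s] := by
  induction out with
  | nil => rfl
  | cons x xs ih =>
    cases xs with
    | nil => simp [pvAppendLast]
    | cons y ys => simpa [pvAppendLast] using ih

theorem pvJoinEmpty_cons (l : String) (t : List String) :
    PySem.Str.join "" (l :: t) = l ++ PySem.Str.join "" t := by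
  cases t with
  | nil =>
    simp [PySem.Str.join, PySem.Chars.join_singleton, PySem.Chars.join_nil,
      String.ofList_toList]
  | cons q qs =>
    simp only [PySem.Str.join, List.map]
    rw [show ("" : String).toList = [] from rfl, PySem.Chars.join_cons_cons]
    simp [String.ofList_append, String.ofList_toList]

-- A's fold, rendered, equals the common spec (side condition: inside_if ⇒ output nonempty)
theorem pvSideA (ls : List String) : ∀ (out : List String) (b : Bool),
    (b = true → out ≠ []) →
    pvRender (ls.foldl pvStepA (out, b)).1 = pvRender out ++ pvBody b ls := by
  induction ls with
  | nil => intro out b _; simp [pvBody]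
  | cons l ls ih =>
    intro out b hne
    cases hps : pvStartsIf l with
    | true =>
      simp only [List.foldl, pvStepA, hps, reduceIte]
      rw [ih (out ++ [l]) true (by simp), pvRender_snoc]
      simp [pvBody, hps, String.append_assoc]
    | false =>
      cases b with
      | false =>
        simp only [List.foldl, pvStepA, hps, Bool.false_eq_true, reduceIte]
        rw [ih (out ++ [l]) false (by simp), pvRender_snoc]
        simp [pvBody, hps, String.append_assoc]
      | true =>
        obtain ⟨out₀, cur, rfl⟩ := (List.eq_nil_or_concat out).resolve_left (hne rfl)
        cases hes : PySem.Str.endswith l ";" with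
        | true =>
          simp only [List.foldl, pvStepA, hps, hes, Bool.false_eq_true, reduceIte,
            List.concat_eq_append, pvAppendLast_snoc]
          rw [ih (out₀ ++ [cur ++ (" " ++ l)]) false (by simp), pvRender_snoc,
            pvRender_snoc]
          have hes' : PySem.Chars.endswith l.toList [';'] = true := hes
          simp [pvBody, hps, hes', String.append_assoc]
        | false =>
          simp only [List.foldl, pvStepA, hps, hes, Bool.false_eq_true, reduceIte,
            List.concat_eq_append, pvAppendLast_snoc]
          rw [ih (out₀ ++ [cur ++ (" " ++ l)]) true (by simp), pvRender_snoc,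
            pvRender_snoc]
          have hes' : PySem.Chars.endswith l.toList [';'] = false := hes
          simp [pvBody, hps, hes', String.append_assoc]

theorem pvRender_from (ls : List String) : ∀ r : String,
    ls.foldl (fun r l => r ++ ("\n" ++ l)) r = r ++ pvRender ls := by
  induction ls with
  | nil => intro r; simp [pvRender]
  | cons l rest ih =>
    intro r
    rw [List.foldl, ih, show pvRender (l :: rest) = rest.foldl (fun r l => r ++ ("\n" ++ l)) ("" ++ ("\n" ++ l)) from rfl, ih]
    simp [String.append_assoc]

-- B's staged pipeline equals the common spec
theorem pvSideB (ls : List String) : ∀ b : Bool,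
    PySem.Str.join ""
      ((((pvScan b (ls.map (fun l => (pvStartsIf l, PySem.Str.endswith l ";")))).zip
          (ls.map pvStartsIf)).map
            (fun p : Bool × Bool => if p.1 && !p.2 then " " else "\n")).zip ls
        |>.map (fun p : String × String => p.1 ++ p.2))
      = pvBody b ls := by
  induction ls with
  | nil =>
    intro b
    simp [pvScan, pvBody, PySem.Str.join, PySem.Chars.join_nil]
  | cons l ls ih =>
    intro b
    simp only [List.map, pvScan, List.zip_cons_cons, pvBody]
    rw [pvJoinEmpty_cons, ih]

-- ===== VERDICT (by name: the statement is the Claim_ definition above) =====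
theorem concatenate_shorthand_if_statements_spec : Claim_equal_concatenate_shorthand_if_statements := by
  intro js _
  unfold Spec_concatenate_shorthand_if_statements
  unfold concatenate_shorthand_if_statements concatenate_shorthand_if_statements_alt
  simp only []
  rw [← List.foldl_map (f := PySem.Str.strip) (g := pvStepA)]
  rw [pvRender_from, pvSideA _ [] false (by simp)]
  rw [show (fun l => PySem.Str.startswith l "if" && !(PySem.Str.endswith l "{")) = pvStartsIf from rfl]
  rw [show ([false] : List Bool) = [] ++ [false] from rfl, pvBuild_eq_scan, List.nil_append]
  rw [List.zip_map', pvSideB]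
  simp [pvRender]
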